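-- pv_equiv track=rewrite | github.com/LiXuefeng2020ai/GZPL | prompt_sf/evaluate.py | count_repeat
-- ===== SOURCE A (Python) =====
-- def count_repeat(predict_list):
--     res = {}
--     for index,i in enumerate(predict_list):
--         if i == "none":
--             continue
--         else:
--             if i in res:
--                 res[i].append(index)
--             else:
--                 res[i] = [index]
--     key_set = list(res.keys())
--     for j in key_set:
--         if len(res[j])==1: # 只出现的一次不算重复
--             res.pop(j)
--     return res
-- ===== SOURCE B (Python) =====
-- def count_repeat(predict_list):
--     # per-distinct-value gather: walk the list once over first occurrences and,
--     # for each new non-"none" value, collect all its indices with one scan;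
--     # keep it only if it occurs more than once
--     res = {}
--     seen = set()
--     for v in predict_list:
--         if v == "none" or v in seen:
--             continue
--         seen.add(v)
--         idxs = [index for index, x in enumerate(predict_list) if x == v]
--         if len(idxs) > 1:
--             res[v] = idxs
--     return res
-- ===== Notes on version B (the rewrite author's own statement) =====
-- stated objective: alternative
-- what changed: A makes one grouping pass that appends every index into a dict and then a second pass popping singleton groups; B instead iterates over first occurrences of distinct values and, per distinct value, gathers all its indices with a dedicated inner scan, inserting a group only when it repeats (nested per-value scans instead of single-pass grouping plus pruning).
import Mathlib
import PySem

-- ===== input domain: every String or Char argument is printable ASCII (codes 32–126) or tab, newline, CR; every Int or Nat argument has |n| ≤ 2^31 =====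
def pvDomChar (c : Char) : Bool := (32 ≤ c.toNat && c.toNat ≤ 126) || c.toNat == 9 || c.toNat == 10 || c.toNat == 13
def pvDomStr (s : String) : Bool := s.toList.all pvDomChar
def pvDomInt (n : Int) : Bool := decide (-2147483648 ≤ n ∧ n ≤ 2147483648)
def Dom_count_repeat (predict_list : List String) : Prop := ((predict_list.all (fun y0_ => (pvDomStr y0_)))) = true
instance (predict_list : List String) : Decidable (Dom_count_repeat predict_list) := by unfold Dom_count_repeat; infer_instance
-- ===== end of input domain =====

-- B replaces A's single grouping pass plus singleton-pruning pass by a walk over first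
-- occurrences of distinct values with a dedicated index-gathering scan per value
-- (objective: alternative algorithm; not claimed faster).

-- ===== PORT A =====
-- first loop: group indices of each non-"none" value; second loop: pop groups of length 1
def count_repeat (predict_list : List String) : List (String × List Int) :=
  let res :=
    (PySem.List.enumerate predict_list).foldl
      (fun d p =>
        if p.2 == "none" then d
        else if d.contains p.2 then d.modify p.2 [] (fun v => v ++ [p.1])
        else d.insert p.2 [p.1])
      PySem.Dict.empty
  let key_set := res.keys
  let res2 :=
    key_set.foldl
      (fun d j => if (d.getD j []).length == 1 then d.erase j else d)
      res
  res2.items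

-- ===== PORT B =====
-- loop over values; skip "none" and already-seen values; collect this value's indices by a
-- comprehension over enumerate(predict_list) (filter + map); insert the group iff it repeats
def count_repeat_alt (predict_list : List String) : List (String × List Int) :=
  let final :=
    predict_list.foldl
      (fun (st : PySem.Set String × PySem.Dict String (List Int)) v =>
        if v == "none" || st.1.contains v then st
        else
          let seen := st.1.add v
          let idxs := ((PySem.List.enumerate predict_list).filter (fun p => p.2 == v)).map
            (fun p => p.1)
          if idxs.length > 1 then (seen, st.2.insert v idxs) else (seen, st.2))
      ((PySem.Set.empty : PySem.Set String), (PySem.Dict.empty : PySem.Dict String (List Int)))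
  final.2.items

-- ===== PRECONDITION & SPEC =====
def Spec_count_repeat (predict_list : List String) (out : List (String × List Int)) : Prop := out = count_repeat_alt predict_list
instance (predict_list : List String) (out : List (String × List Int)) : Decidable (Spec_count_repeat predict_list out) := by unfold Spec_count_repeat; infer_instance

-- ===== CLAIM (what is proved, stated in full; the proofs are below) =====
def Claim_equal_count_repeat : Prop := ∀ (predict_list : List String), Dom_count_repeat predict_list → Spec_count_repeat predict_list (count_repeat predict_list)

-- ===== LEMMAS AND PROOFS =====

-- a fold that skips elements failing c is a fold over the filtered list
lemma foldl_if_filter {α β : Type} (g : β → α → β) (c : α → Bool) :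
    ∀ (l : List α) (b : β),
      l.foldl (fun d x => if c x then g d x else d) b = (l.filter c).foldl g b := by
  intro l
  induction l with
  | nil => intro b; rfl
  | cons x t ih =>
    intro b
    cases h : c x <;> simp [List.foldl_cons, h, ih]

-- A's two grouping branches are both `modify`
lemma stepA_eq :
    (fun (d : PySem.Dict String (List Int)) (p : Int × String) =>
      if p.2 == "none" then d
      else if d.contains p.2 then d.modify p.2 [] (fun v => v ++ [p.1])
      else d.insert p.2 [p.1])
    = (fun (d : PySem.Dict String (List Int)) (p : Int × String) =>
      if p.2 != "none" then d.modify p.2 [] (fun v => v ++ [p.1]) else d) := by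
  funext d p
  by_cases h : p.2 = "none"
  · have h1 : (p.2 == "none") = true := by simp [h]
    have h2 : (p.2 != "none") = false := by simp [bne, h1]
    rw [if_pos h1, if_neg (by simp [h2])]
  · have h1 : (p.2 == "none") = false := by simp [h]
    have h2 : (p.2 != "none") = true := by simp [bne, h1]
    rw [if_neg (by simp [h1]), if_pos h2]
    cases hc : d.contains p.2 with
    | true => simp
    | false => simp [PySem.Dict.modify, PySem.Dict.getD_of_not_contains d [] hc]

-- value of the grouping fold at a key
lemma getD_group :
    ∀ (l : List (Int × String)) (d : PySem.Dict String (List Int)) (k : String),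
      (l.foldl (fun d p => d.modify p.2 [] (fun v => v ++ [p.1])) d).getD k []
        = d.getD k [] ++ (l.filter (fun p => p.2 == k)).map (·.1) := by
  intro l
  induction l with
  | nil => simp
  | cons p t ih =>
    intro d k
    simp only [List.foldl_cons, ih, List.filter_cons]
    by_cases h : p.2 = k
    · subst h
      simp [PySem.Dict.getD_modify_self]
    · have hb : (p.2 == k) = false := by simp [h]
      rw [PySem.Dict.getD_modify_of_ne d [] _ (Ne.symm h)]
      simp [hb]

lemma items_erase (d : PySem.Dict String (List Int)) (j : String) :
    (d.erase j).items = d.items.filter (fun p => !(p.1 == j)) := rfl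

lemma keys_erase (d : PySem.Dict String (List Int)) (j : String) :
    (d.erase j).keys = d.keys.filter (fun k => !(k == j)) := by
  simp only [PySem.Dict.keys, items_erase]
  rw [List.filter_map]
  rfl

-- the pruning fold filters the items list
lemma prune_items :
    ∀ (ks : List String) (d : PySem.Dict String (List Int)), d.keys.Nodup →
      (ks.foldl (fun d j => if (d.getD j []).length == 1 then d.erase j else d) d).items
        = d.items.filter (fun p => !(decide (p.1 ∈ ks) && (p.2.length == 1))) := by
  intro ks
  induction ks with
  | nil => intro d _; simp
  | cons j ks ih =>
    intro d hnd
    simp only [List.foldl_cons]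
    by_cases h : (d.getD j []).length = 1
    · have hb : ((d.getD j []).length == 1) = true := by simp [h]
      rw [hb, if_pos rfl]
      have hnd' : (d.erase j).keys.Nodup := by
        rw [keys_erase]; exact hnd.filter _
      rw [ih _ hnd', items_erase, List.filter_filter]
      apply List.filter_congr
      intro a ha
      by_cases haj : a.1 = j
      · have : d.getD j [] = a.2 := by
          rw [← haj]
          exact PySem.Dict.getD_of_mem_items d (by simpa using ha) hnd []
        have hlen : (a.2.length == 1) = true := by simp [← this, h]
        simp [haj, hlen]
      · simp [haj, List.mem_cons]
    · have hb : ((d.getD j []).length == 1) = false := by simp [h]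
      rw [hb, if_neg (by simp)]
      rw [ih _ hnd]
      apply List.filter_congr
      intro a ha
      by_cases haj : a.1 = j
      · have : d.getD j [] = a.2 := by
          rw [← haj]
          exact PySem.Dict.getD_of_mem_items d (by simpa using ha) hnd []
        have hlen : (a.2.length == 1) = false := by simp [← this, h]
        simp [haj, hlen]
      · simp [haj, List.mem_cons]

-- Set.ofList commutes with filter
lemma ofList_filter {α : Type} [BEq α] [LawfulBEq α] (p : α → Bool) :
    ∀ (l : List α), PySem.Set.ofList (l.filter p) = (PySem.Set.ofList l).filter p := by
  intro l
  induction l with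
  | nil => rfl
  | cons x t ih =>
    cases h : p x
    · rw [List.filter_cons, h, if_neg (by simp), ih, PySem.Set.ofList_cons]
      simp only [PySem.Set.discard, List.filter_filter, List.filter_cons, h]
      rw [if_neg (by simp)]
      apply List.filter_congr
      intro a _
      by_cases hax : a = x
      · subst hax; simp [h]
      · simp [hax]
    · rw [List.filter_cons, h, if_pos rfl, PySem.Set.ofList_cons, PySem.Set.ofList_cons, ih,
        List.filter_cons, h, if_pos rfl]
      congr 1
      simp only [PySem.Set.discard, List.filter_filter]
      apply List.filter_congr
      intro a _
      exact Bool.and_comm _ _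

-- filtering by a per-value predicate then selecting one value k with q k = true selects the same pairs
lemma filter_key_filter (l : List (Int × String)) (q : String → Bool) (k : String)
    (hq : q k = true) :
    (l.filter (fun p => q p.2)).filter (fun p => p.2 == k) = l.filter (fun p => p.2 == k) := by
  rw [List.filter_filter]
  apply List.filter_congr
  intro p _
  cases h : (p.2 == k)
  · simp
  · have : p.2 = k := by simpa using h
    simp [this, hq]

lemma bool_len_ne_one (n : ℕ) (hn : 0 < n) : (!(n == 1)) = decide (1 < n) := by
  by_cases h1 : n = 1
  · simp [h1]
  · have h2 : 1 < n := by omega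
    simp [h1, h2]

-- the distinct values B's loop admits, in order: first occurrences not in seen, not "none",
-- kept when the selection predicate holds
def bKeys (c : String → Bool) : List String → PySem.Set String → List String
  | [], _ => []
  | v :: t, seen =>
    if v == "none" || seen.contains v then bKeys c t seen
    else (if c v then [v] else []) ++ bKeys c t (PySem.Set.add seen v)

-- B's fold, generalized: items grow by one pair per admitted key, in bKeys order
lemma bfold_items (idx : String → List Int) :
    ∀ (l : List String) (seen : PySem.Set String) (res : PySem.Dict String (List Int)),
      (∀ k, res.contains k = true → seen.contains k = true) →
      (l.foldl
        (fun (st : PySem.Set String × PySem.Dict String (List Int)) v =>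
          if v == "none" || st.1.contains v then st
          else
            if (idx v).length > 1 then (st.1.add v, st.2.insert v (idx v))
            else (st.1.add v, st.2))
        (seen, res)).2.items
      = res.items ++ (bKeys (fun v => decide ((idx v).length > 1)) l seen).map
          (fun k => (k, idx k)) := by
  intro l
  induction l with
  | nil => intro seen res _; simp [bKeys]
  | cons v t ih =>
    intro seen res hinv
    by_cases hskip : (v == "none" || seen.contains v) = true
    · simp only [List.foldl_cons, bKeys, if_pos hskip]
      exact ih seen res hinv
    · have hflat : (v == "none" || seen.contains v) = false := by
        cases h : (v == "none" || seen.contains v)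
        · rfl
        · exact absurd h hskip
      obtain ⟨hvn, hseen⟩ := Bool.or_eq_false_iff.mp hflat
      simp only [List.foldl_cons, bKeys, if_neg hskip]
      have hres : res.contains v = false := by
        cases h : res.contains v
        · rfl
        · rw [hinv v h] at hseen; exact absurd hseen (by decide)
      have hinv' : ∀ k, res.contains k = true → (seen.add v).contains k = true := by
        intro k hk
        have hmem : k ∈ seen := (PySem.Set.contains_iff seen k).mp (hinv k hk)
        exact (PySem.Set.contains_iff (seen.add v) k).mpr
          ((PySem.Set.mem_add seen v k).mpr (Or.inl hmem))
      by_cases hc : (idx v).length > 1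
      · have hcb : decide ((idx v).length > 1) = true := by simp [hc]
        rw [if_pos hc, if_pos hcb]
        have hinv'' : ∀ k, (res.insert v (idx v)).contains k = true →
            (seen.add v).contains k = true := by
          intro k hk
          rw [PySem.Dict.contains_insert] at hk
          cases (Bool.or_eq_true_iff.mp hk) with
          | inl h =>
            have : k = v := by simpa using h
            subst this
            exact (PySem.Set.contains_iff (seen.add k) k).mpr
              ((PySem.Set.mem_add seen k k).mpr (Or.inr rfl))
          | inr h => exact hinv' k h
        have hrec := ih (seen.add v) (res.insert v (idx v)) hinv''
        simp only [hrec]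
        rw [PySem.Dict.items_insert_of_not_contains _ _ hres]
        simp
      · have hcb : ¬ (decide ((idx v).length > 1) = true) := by simp [hc]
        rw [if_neg hc, if_neg hcb]
        have hrec := ih (seen.add v) res hinv'
        simpa using hrec

-- bKeys is the seen-relative ordered dedup of the non-"none" values, filtered by c
lemma bKeys_eq (c : String → Bool) :
    ∀ (l : List String) (seen : PySem.Set String),
      bKeys c l seen
        = (PySem.Set.ofList (l.filter (fun v => !(v == "none") && !seen.contains v))).filter c := by
  intro l
  induction l with
  | nil => intro seen; rfl
  | cons v t ih =>
    intro seen
    by_cases hskip : (v == "none" || seen.contains v) = true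
    · have hp : (!(v == "none") && !seen.contains v) = false := by
        cases (Bool.or_eq_true_iff.mp hskip) with
        | inl h => simp [h]
        | inr h => rw [h]; simp
      simp only [bKeys, if_pos hskip, List.filter_cons, hp]
      rw [if_neg (by simp)]
      exact ih seen
    · have hflat : (v == "none" || seen.contains v) = false := by
        cases h : (v == "none" || seen.contains v)
        · rfl
        · exact absurd h hskip
      obtain ⟨hvn, hseen⟩ := Bool.or_eq_false_iff.mp hflat
      have hnm : v ∉ seen := by
        intro hm
        rw [(PySem.Set.contains_iff seen v).mpr hm] at hseen
        exact absurd hseen (by decide)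
      have hp : (!(v == "none") && !seen.contains v) = true := by simp [hvn, hnm]
      simp only [bKeys, if_neg hskip, List.filter_cons, hp, if_pos]
      rw [PySem.Set.ofList_cons]
      -- relate the tail filters at seen and at seen.add v
      have htail : PySem.Set.ofList
            (t.filter (fun w => !(w == "none") && !(seen.add v).contains w))
          = PySem.Set.discard
              (PySem.Set.ofList (t.filter (fun w => !(w == "none") && !seen.contains w))) v := by
        have hpt : t.filter (fun w => !(w == "none") && !(seen.add v).contains w)
            = (t.filter (fun w => !(w == "none") && !seen.contains w)).filter
                (fun w => !(w == v)) := by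
          rw [List.filter_filter]
          apply List.filter_congr
          intro w _
          by_cases hwv : w = v
          · subst hwv
            simp
          · simp [hwv]
        rw [hpt, ofList_filter]
        rfl
      rw [ih (seen.add v), htail]
      simp only [List.filter_cons]
      by_cases hcv : c v = true
      · rw [if_pos (by simp [hcv]), hcv, if_pos rfl]
        rfl
      · have hcf : c v = false := by simpa using hcv
        rw [if_neg (by simp [hcf]), hcf, if_neg (by simp)]
        simp

theorem count_repeat_eq (xs : List String) :
    count_repeat xs = count_repeat_alt xs := by
  classical
  set enum := PySem.List.enumerate xs with henum
  set idx : String → List Int :=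
    fun k => (enum.filter (fun p => p.2 == k)).map (fun p => p.1) with hidx
  set cB : String → Bool := fun k => decide ((idx k).length > 1) with hcB
  set vals := xs.filter (fun v => v != "none") with hvals
  set l₁ := enum.filter (fun p => p.2 != "none") with hl₁
  set D₁ : PySem.Dict String (List Int) :=
    l₁.foldl (fun d p => d.modify p.2 [] (fun v => v ++ [p.1])) PySem.Dict.empty with hD₁
  have hnd1 : D₁.keys.Nodup :=
    PySem.Dict.nodup_keys_foldl_modify_key l₁ (fun p => p.2) [] (fun _ p v => v ++ [p.1])
      PySem.Dict.empty (by simp [PySem.Dict.keys_empty])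
  have hK1 : D₁.keys = PySem.Set.ofList (l₁.map (fun p => p.2)) := by
    have := PySem.Dict.keys_foldl_modify_key l₁ (fun p => p.2) [] (fun _ p v => v ++ [p.1])
      PySem.Dict.empty
    simpa [PySem.Dict.keys_empty, PySem.Set.update_nil_left] using this
  have hvals1 : l₁.map (fun p => p.2) = vals := by
    have h1 := List.filter_map (f := fun p : Int × String => p.2)
      (p := fun v => v != "none") (l := enum)
    rw [PySem.List.map_snd_enumerate] at h1
    exact h1.symm
  have hget1 : ∀ k : String, (k != "none") = true → D₁.getD k [] = idx k := by
    intro k hk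
    have := getD_group l₁ PySem.Dict.empty k
    rw [this, PySem.Dict.getD_empty, List.nil_append, hl₁,
      filter_key_filter enum (fun v => v != "none") k hk]
  have hlen : ∀ k : String, (idx k).length = xs.count k := by
    intro k
    rw [hidx]
    simp only [List.length_map]
    rw [← List.countP_eq_length_filter]
    have hm : List.countP (fun v => v == k) (enum.map (fun p => p.2))
        = List.countP (fun p : Int × String => p.2 == k) enum := List.countP_map
    rw [henum, PySem.List.map_snd_enumerate] at hm
    rw [← hm, List.count]
  -- value-membership facts for keys in ofList vals
  have hmemfacts : ∀ k : String, k ∈ PySem.Set.ofList vals →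
      (k != "none") = true ∧ 0 < xs.count k := by
    intro k hk
    have hkv : k ∈ vals := (PySem.Set.mem_ofList vals k).mp hk
    exact ⟨(List.mem_filter.mp hkv).2, List.count_pos_iff.mpr (List.mem_filter.mp hkv).1⟩
  -- A's result, as a map over the selected keys
  have hA : count_repeat xs
      = ((PySem.Set.ofList vals).filter cB).map (fun k => (k, idx k)) := by
    simp only [count_repeat]
    rw [stepA_eq, foldl_if_filter]
    rw [← hl₁, ← hD₁]
    rw [prune_items _ _ hnd1]
    have hsimpl : D₁.items.filter
          (fun p => !(decide (p.1 ∈ D₁.keys) && (p.2.length == 1)))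
        = D₁.items.filter (fun p => !(p.2.length == 1)) := by
      apply List.filter_congr
      intro p hp
      have hmem : p.1 ∈ D₁.keys := PySem.Dict.mem_keys_of_mem_items _ hp
      simp [hmem]
    rw [hsimpl]
    rw [PySem.Dict.items_eq_map_keys D₁ hnd1 []]
    rw [List.filter_map]
    rw [show ((fun p : String × List Int => !(p.2.length == 1)) ∘ (fun k => (k, D₁.getD k [])))
        = (fun k => !((D₁.getD k []).length == 1)) from rfl]
    have hkeysfilter : D₁.keys.filter (fun k => !((D₁.getD k []).length == 1))
        = (PySem.Set.ofList vals).filter cB := by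
      rw [hK1, hvals1]
      apply List.filter_congr
      intro k hk
      obtain ⟨hk1, hpos⟩ := hmemfacts k hk
      rw [hget1 k hk1, hlen k, bool_len_ne_one _ hpos, hcB]
      simp only [hlen k]
    rw [hkeysfilter]
    apply List.map_congr_left
    intro k hk
    have hk' : k ∈ PySem.Set.ofList vals := List.mem_of_mem_filter hk
    obtain ⟨hk1, _⟩ := hmemfacts k hk'
    rw [hget1 k hk1]
  -- B's result, as the same map
  have hB : count_repeat_alt xs
      = ((PySem.Set.ofList vals).filter cB).map (fun k => (k, idx k)) := by
    simp only [count_repeat_alt]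
    have hstep : (fun (st : PySem.Set String × PySem.Dict String (List Int)) v =>
        if v == "none" || st.1.contains v then st
        else
          let seen := st.1.add v
          let idxs := ((PySem.List.enumerate xs).filter (fun p => p.2 == v)).map (fun p => p.1)
          if idxs.length > 1 then (seen, st.2.insert v idxs) else (seen, st.2))
        = (fun (st : PySem.Set String × PySem.Dict String (List Int)) v =>
        if v == "none" || st.1.contains v then st
        else
          if (idx v).length > 1 then (st.1.add v, st.2.insert v (idx v))
          else (st.1.add v, st.2)) := by
      funext st v
      simp only [hidx, henum]
    rw [hstep]
    rw [bfold_items idx xs PySem.Set.empty PySem.Dict.empty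
      (by intro k hk; simp [PySem.Dict.contains_empty] at hk)]
    rw [bKeys_eq]
    have hfe : xs.filter (fun v => !(v == "none") && !(PySem.Set.empty : PySem.Set String).contains v)
        = vals := by
      rw [hvals]
      apply List.filter_congr
      intro v _
      simp [PySem.Set.empty, bne]
    rw [hfe, ← hcB]
    simp [PySem.Dict.empty]
  rw [hA, hB]

-- ===== VERDICT (by name: the statement is the Claim_ definition above) =====
theorem count_repeat_spec : Claim_equal_count_repeat := by
  intro predict_list _
  unfold Spec_count_repeat
  exact count_repeat_eq predict_list
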